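-- pv_equiv track=rewrite | github.com/akekesi/Connect4 | src/utils/check_end.py | check_winner_diagonal_right_neg
-- ===== SOURCE A (Python) =====
-- def check_winner_diagonal_right_neg(board: list[list[int]], player: str, win: int) -> bool:
--     """
--     Checks for a diagonal win from top-right to bottom-left.
--
--     Args:
--         board (list[list[int]]): The game board as a 2D list.
--         player (str): The player's identifier.
--         win (int): The number of consecutive marks required to win.
--
--     Returns:
--         bool: True if a diagonal win is found, False otherwise.
--     """
--     row = len(board)
--     col = len(board[0])
--     for r in range(row):
--         win_ = 0
--         for c in range(col):
--             if row <= r + c: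
--                 break
--             if board[r + c][col - 1 - c] == player:
--                 win_ += 1
--             else:
--                 win_ = 0
--             if win_ == win:
--                 return True
--     return False
-- ===== SOURCE B (Python) =====
-- def _runs(xs):
--     """Run-length encode xs into [[value, count], ...]."""
--     runs = []
--     for x in xs:
--         if runs and runs[-1][0] == x:
--             runs[-1][1] += 1
--         else:
--             runs.append([x, 1])
--     return runs
--
--
-- def check_winner_diagonal_right_neg(board, player, win):
--     row = len(board)
--     col = len(board[0])
--     for r in range(row):
--         diag = [board[r + c][col - 1 - c] for c in range(col) if r + c < row]
--         if any(value == player and count >= win for value, count in _runs(diag)):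
--             return True
--     return False
-- ===== Notes on version B (the rewrite author's own statement) =====
-- stated objective: alternative
-- what changed: A's inline consecutive-counter state machine over each anti-diagonal is replaced by materializing the diagonal as a list, run-length encoding it, and asking whether any run of the player has length >= win.
-- outside the precondition, e.g. on check_winner_diagonal_right_neg([['x']], 'x', 0): A returns False, B returns True; on check_winner_diagonal_right_neg([['x', 'x'], []], 'x', 1): A returns True, B raises IndexError
import Mathlib
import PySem

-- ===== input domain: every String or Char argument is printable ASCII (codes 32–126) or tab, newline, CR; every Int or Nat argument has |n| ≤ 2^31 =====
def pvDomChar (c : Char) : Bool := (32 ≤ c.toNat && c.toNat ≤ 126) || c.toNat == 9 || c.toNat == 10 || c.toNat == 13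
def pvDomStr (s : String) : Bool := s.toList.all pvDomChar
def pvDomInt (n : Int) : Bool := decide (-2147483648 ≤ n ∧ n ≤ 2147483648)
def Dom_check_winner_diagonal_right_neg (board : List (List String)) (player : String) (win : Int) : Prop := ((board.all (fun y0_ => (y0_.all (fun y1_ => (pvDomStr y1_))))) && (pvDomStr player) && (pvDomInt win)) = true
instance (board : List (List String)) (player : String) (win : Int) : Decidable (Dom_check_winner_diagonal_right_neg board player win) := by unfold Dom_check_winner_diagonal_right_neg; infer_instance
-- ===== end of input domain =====

-- B replaces A's inline consecutive-counter state machine with a list extraction of each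
-- anti-diagonal plus a run-length-encoding pass (objective: alternative decomposition, same cost).


-- ===== PORT A =====
-- inner 'for c in range(col)' loop of A: break on row <= r+c, counter win_, early return on win_ == win
def pvA_inner (board : List (List String)) (player : String) (win row col r : Int) :
    List Int → Int → Bool
  | [], _ => false
  | c :: cs, win_ =>
    if row ≤ r + c then false
    else
      let w : Int :=
        if ((PySem.List.pyGet? board (r + c)).bind
              (fun rw => PySem.List.pyGet? rw (col - 1 - c))) == some player
        then win_ + 1 else 0
      if w == win then true else pvA_inner board player win row col r cs w

def check_winner_diagonal_right_neg (board : List (List String)) (player : String) (win : Int) : Bool :=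
  let row : Int := board.length
  let col : Int := (board.headD []).length
  (PySem.List.pyRange 0 row 1).any (fun r =>
    pvA_inner board player win row col r (PySem.List.pyRange 0 col 1) 0)

-- ===== PORT B =====
-- run-length encoding (Python _runs: append-at-end list mutation, transliterated as a
-- reversed-accumulator fold followed by a reverse)
def pvRunsB (xs : List (Option String)) : List (Option String × Int) :=
  (xs.foldl (fun runs x =>
      match runs with
      | (k, n) :: rest => if k == x then (k, n + 1) :: rest else (x, 1) :: (k, n) :: rest
      | [] => [(x, 1)]) []).reverse

def check_winner_diagonal_right_neg_alt (board : List (List String)) (player : String) (win : Int) : Bool :=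
  let row : Int := board.length
  let col : Int := (board.headD []).length
  (PySem.List.pyRange 0 row 1).any (fun r =>
    let diag := ((PySem.List.pyRange 0 col 1).filter (fun c => decide (r + c < row))).map
      (fun c => (PySem.List.pyGet? board (r + c)).bind
        (fun rw => PySem.List.pyGet? rw (col - 1 - c)))
    (pvRunsB diag).any (fun p => p.1 == some player && decide (win ≤ p.2)))

-- ===== PRECONDITION & SPEC =====
-- Pre_ excludes: empty boards and boards with a row shorter than the first row, on which A
-- raises IndexError except when an earlier diagonal already wins (there B's whole-diagonal
-- extraction still raises); and win ≤ 0, outside the natural domain of a win length, where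
-- A's check-counter-after-update behaviour is accidental.
def Pre_check_winner_diagonal_right_neg (board : List (List String)) (player : String) (win : Int) : Prop :=
  board ≠ [] ∧ 1 ≤ win ∧ ∀ rw ∈ board, (board.headD []).length ≤ rw.length
instance (board : List (List String)) (player : String) (win : Int) : Decidable (Pre_check_winner_diagonal_right_neg board player win) := by unfold Pre_check_winner_diagonal_right_neg; infer_instance

def pvWitness_check_winner_diagonal_right_neg : List (List String) × String × Int :=
  ([["x", "o"], ["x", "x"]], "x", 2)

def Spec_check_winner_diagonal_right_neg (board : List (List String)) (player : String) (win : Int) (out : Bool) : Prop := out = check_winner_diagonal_right_neg_alt board player win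
instance (board : List (List String)) (player : String) (win : Int) (out : Bool) : Decidable (Spec_check_winner_diagonal_right_neg board player win out) := by unfold Spec_check_winner_diagonal_right_neg; infer_instance

-- ===== CLAIM (what is proved, stated in full; the proofs are below) =====
def Claim_equal_check_winner_diagonal_right_neg : Prop := ∀ (board : List (List String)) (player : String) (win : Int), Dom_check_winner_diagonal_right_neg board player win → Pre_check_winner_diagonal_right_neg board player win → Spec_check_winner_diagonal_right_neg board player win (check_winner_diagonal_right_neg board player win)

-- ===== LEMMAS AND PROOFS =====

-- proof-side names for B's fold step and run predicate
def pvStep : List (Option String × Int) → Option String → List (Option String × Int) :=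
  fun runs x =>
    match runs with
    | (k, n) :: rest => if k == x then (k, n + 1) :: rest else (x, 1) :: (k, n) :: rest
    | [] => [(x, 1)]

def pvPred (player : String) (win : Int) : Option String × Int → Bool :=
  fun p => p.1 == some player && decide (win ≤ p.2)

lemma pvRunsB_eq (xs : List (Option String)) : pvRunsB xs = (xs.foldl pvStep []).reverse := rfl

-- once the accumulator contains a winning run, folding more elements keeps one
lemma pv_any_foldl (player : String) (win : Int) :
    ∀ (l : List (Option String)) (acc : List (Option String × Int)),
      acc.any (pvPred player win) = true →
      ((l.foldl pvStep acc).any (pvPred player win)) = true := by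
  intro l
  induction l with
  | nil => intro acc h; simpa using h
  | cons x xs ih =>
    intro acc h
    simp only [List.foldl_cons]
    apply ih
    match acc, h with
    | (k, n) :: rest, h =>
      simp only [List.any_cons, Bool.or_eq_true] at h
      simp only [pvStep]
      by_cases hkx : (k == x) = true
      · simp only [hkx, if_true, List.any_cons, Bool.or_eq_true]
        rcases h with h | h
        · left
          simp only [pvPred, Bool.and_eq_true, decide_eq_true_eq] at h ⊢
          exact ⟨h.1, by omega⟩
        · right; exact h
      · simp only [hkx, Bool.false_eq_true, if_false, List.any_cons, Bool.or_eq_true]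
        rcases h with h | h
        · exact Or.inr (Or.inl h)
        · exact Or.inr (Or.inr h)

-- the key per-diagonal invariant: A's counter loop over cs (with its monotone break)
-- equals folding B's run-length step over the filtered, extracted diagonal
lemma pv_key (board : List (List String)) (player : String) (win row col r : Int)
    (hwin : 1 ≤ win) :
    ∀ (cs : List Int), cs.Pairwise (· ≤ ·) →
    ∀ (acc : List (Option String × Int)) (win_ : Int),
      acc.any (pvPred player win) = false →
      0 ≤ win_ → win_ < win →
      (match acc with
       | [] => win_ = 0
       | (k, n) :: _ => if k = some player then win_ = n else win_ = 0) →
      pvA_inner board player win row col r cs win_ =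
        (((cs.filter (fun c => decide (r + c < row))).map
            (fun c => (PySem.List.pyGet? board (r + c)).bind
              (fun rw => PySem.List.pyGet? rw (col - 1 - c)))).foldl pvStep acc).any
          (pvPred player win) := by
  intro cs
  induction cs with
  | nil =>
    intro _ acc win_ hacc _ _ _
    simp [pvA_inner, hacc]
  | cons c rest ih =>
    intro hpw acc win_ hacc h0 hlt hst
    rw [List.pairwise_cons] at hpw
    obtain ⟨hall, hrest⟩ := hpw
    by_cases hbr : row ≤ r + c
    · -- A breaks; every later c' also fails the filter, so the fold adds nothing
      have hfilter : (c :: rest).filter (fun c => decide (r + c < row)) = [] := by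
        rw [List.filter_eq_nil_iff]
        intro c' hc'
        rcases List.mem_cons.mp hc' with rfl | hmem
        · simp; omega
        · have := hall c' hmem; simp; omega
      simp only [pvA_inner, if_pos hbr, hfilter, List.map_nil, List.foldl_nil]
      exact hacc.symm
    · have hkeep : r + c < row := by omega
      have hfilter : (c :: rest).filter (fun c => decide (r + c < row)) =
          c :: rest.filter (fun c => decide (r + c < row)) := by
        simp [List.filter_cons, hkeep]
      rw [hfilter]
      set x := (PySem.List.pyGet? board (r + c)).bind
          (fun rw => PySem.List.pyGet? rw (col - 1 - c)) with hxdef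
      simp only [pvA_inner, if_neg hbr, List.map_cons, List.foldl_cons]
      by_cases hx : (x == some player) = true
      · have hxeq : x = some player := eq_of_beq hx
        rw [if_pos hx]
        -- the fold step puts (some player, win_ + 1) at the head of the accumulator
        have hstep : ∃ tail, pvStep acc x = (some player, win_ + 1) :: tail ∧
            tail.any (pvPred player win) = false := by
          match acc, hst, hacc with
          | [], hst, _ =>
            exact ⟨[], by simp [pvStep, hxeq, hst], by simp⟩
          | (k, n) :: t, hst, hacc =>
            simp only [List.any_cons, Bool.or_eq_false_iff] at hacc
            have hst' : if k = some player then win_ = n else win_ = 0 := hst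
            by_cases hk : k = some player
            · have hkx : (k == x) = true := by rw [hxeq, hk]; exact beq_self_eq_true _
              rw [if_pos hk] at hst'
              exact ⟨t, by simp [pvStep, hk, hst', hxeq], hacc.2⟩
            · have hkx : (k == x) = false := by
                rw [hxeq]; exact beq_eq_false_iff_ne.mpr hk
              rw [if_neg hk] at hst'
              exact ⟨(k, n) :: t, by simp [pvStep, hxeq, hst', hk],
                by simp [List.any_cons, hacc.1, hacc.2]⟩
        obtain ⟨tail, hs, htail⟩ := hstep
        by_cases hw : ((win_ + 1 : Int) == win) = true
        · -- A returns True; the head run already wins, and folding preserves a winning run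
          have hweq : win_ + 1 = win := eq_of_beq hw
          rw [if_pos hw]
          refine (pv_any_foldl player win _ _ ?_).symm
          rw [hs]
          simp [pvPred, hweq.ge]
        · -- counter advances; the invariants transfer to the new head run
          have hwlt : win_ + 1 < win := by
            have : win_ + 1 ≠ win := fun h => hw (beq_iff_eq.mpr h)
            omega
          rw [if_neg hw]
          rw [ih hrest (pvStep acc x) (win_ + 1) ?_ (by omega) hwlt ?_]
          · rw [hs]
            have hhead : pvPred player win (some player, win_ + 1) = false := by
              simp only [pvPred, Bool.and_eq_false_iff]
              right; simp; omega
            simp [List.any_cons, hhead, htail]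
          · rw [hs]; simp
      · -- mismatch: counter resets to 0, which never equals win since 1 ≤ win
        have hxne : x ≠ some player := fun h => hx (by rw [h]; exact beq_self_eq_true _)
        rw [if_neg hx]
        have hzw : ¬(((0 : Int) == win) = true) := by
          intro h; have := eq_of_beq h; omega
        rw [if_neg hzw]
        have hstep : (pvStep acc x).any (pvPred player win) = false ∧
            (match pvStep acc x with
             | [] => (0 : Int) = 0
             | (k, n) :: _ => if k = some player then (0 : Int) = n else (0 : Int) = 0) := by
          match acc, hacc with
          | [], _ =>
            refine ⟨by simp [pvStep, pvPred, beq_eq_false_iff_ne.mpr hxne], ?_⟩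
            simp [pvStep, hxne]
          | (k, n) :: t, hacc =>
            simp only [List.any_cons, Bool.or_eq_false_iff] at hacc
            by_cases hkx : (k == x) = true
            · have hkp : k ≠ some player := by
                have : k = x := eq_of_beq hkx
                rw [this]; exact hxne
              refine ⟨?_, ?_⟩
              · simp only [pvStep, hkx, if_true, List.any_cons, Bool.or_eq_false_iff]
                exact ⟨by simp [pvPred, beq_eq_false_iff_ne.mpr hkp], hacc.2⟩
              · simp [pvStep, hkx, hkp]
            · refine ⟨?_, ?_⟩
              · simp only [pvStep, hkx, Bool.false_eq_true, if_false, List.any_cons,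
                  Bool.or_eq_false_iff]
                exact ⟨by simp [pvPred, beq_eq_false_iff_ne.mpr hxne], hacc.1, hacc.2⟩
              · simp [pvStep, hkx, hxne]
        rw [ih hrest (pvStep acc x) 0 hstep.1 le_rfl (by omega) hstep.2]

-- per-row bodies of the two outer .any loops agree (given 1 ≤ win)
lemma pv_row (board : List (List String)) (player : String) (win : Int) (hwin : 1 ≤ win)
    (r : Int) :
    pvA_inner board player win (board.length) ((board.headD []).length) r
        (PySem.List.pyRange 0 ((board.headD []).length) 1) 0 =
      (pvRunsB (((PySem.List.pyRange 0 ((board.headD []).length) 1).filter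
            (fun c => decide (r + c < (board.length : Int)))).map
          (fun c => (PySem.List.pyGet? board (r + c)).bind
            (fun rw => PySem.List.pyGet? rw (((board.headD []).length : Int) - 1 - c))))).any
        (fun p => p.1 == some player && decide (win ≤ p.2)) := by
  have hpw : (PySem.List.pyRange 0 ((board.headD []).length) 1).Pairwise (· ≤ ·) :=
    (PySem.List.pairwise_lt_pyRange_one 0 ((board.headD []).length : Int)).imp (fun h => le_of_lt h)
  rw [pv_key board player win (board.length) ((board.headD []).length) r hwin _ hpw [] 0
      (by simp) le_rfl (by omega) (by simp)]
  rw [pvRunsB_eq]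
  rw [List.any_reverse]
  rfl

-- ===== VERDICT (by name: the statement is the Claim_ definition above) =====
theorem check_winner_diagonal_right_neg_spec : Claim_equal_check_winner_diagonal_right_neg := by
  intro board player win _ hpre
  obtain ⟨-, hwin, -⟩ := hpre
  show check_winner_diagonal_right_neg board player win =
    check_winner_diagonal_right_neg_alt board player win
  unfold check_winner_diagonal_right_neg check_winner_diagonal_right_neg_alt
  exact congrArg ((PySem.List.pyRange 0 (board.length : Int) 1).any)
    (funext (pv_row board player win hwin))
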